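-- pv_equiv track=rewrite | github.com/jungianca6/Ejercicios_IntroYTaller | Códigos/Trabajo clase #12 GVM Taller Progra.py | suma10
-- ===== SOURCE A (Python) =====
-- def suma10(num):
--     if isinstance(num,int):
--         num=abs(num)
--         suma = 0
--         while num!=0:
--             suma += num%10
--             num//= 10
--         return suma>=10
--     else:
--         return 'error'
-- ===== SOURCE B (Python) =====
-- def suma10(num):
--     if isinstance(num, int):
--         return sum(int(c) for c in str(abs(num))) >= 10
--     else:
--         return 'error'
-- ===== Notes on version B (the rewrite author's own statement) =====
-- stated objective: idiomatic
-- what changed: B replaces the arithmetic %10-and-//=10 extraction loop with a digit sum over the characters of str(abs(num)), a one-line generator expression over the decimal string representation.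
import Mathlib
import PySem

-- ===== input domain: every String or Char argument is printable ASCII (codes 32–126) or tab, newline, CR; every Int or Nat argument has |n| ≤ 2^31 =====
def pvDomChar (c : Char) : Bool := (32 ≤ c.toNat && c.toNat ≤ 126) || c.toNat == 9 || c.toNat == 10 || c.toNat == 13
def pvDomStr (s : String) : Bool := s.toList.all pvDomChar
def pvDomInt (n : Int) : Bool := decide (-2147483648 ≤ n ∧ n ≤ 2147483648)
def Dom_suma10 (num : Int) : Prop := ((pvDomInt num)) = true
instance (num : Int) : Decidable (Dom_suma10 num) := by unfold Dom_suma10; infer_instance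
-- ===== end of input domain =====

-- B computes the digit sum over the characters of str(abs(num)) instead of A's %10 / //=10
-- arithmetic loop (objective: idiomatic; return-value equivalence; the isinstance guard is
-- vacuous under the Int signature).

-- ===== PORT A =====
-- The while loop runs on num = abs(num) ≥ 0, so it is ported as recursion on Nat
-- (on nonnegative values Python's % and // agree with Nat's % and /).
def suma10Loop (num : Nat) (suma : Int) : Int :=
  if num = 0 then suma
  else suma10Loop (num / 10) (suma + (num % 10 : Nat))
termination_by num
decreasing_by exact Nat.div_lt_self (Nat.pos_of_ne_zero (by assumption)) (by norm_num)

def suma10 (num : Int) : Bool :=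
  decide (suma10Loop num.natAbs 0 ≥ 10)

-- ===== PORT B =====
-- sum(int(c) for c in str(abs(num))): int(c) on a single decimal digit char is its
-- code point minus 48 (exact, since str() of a nonnegative int yields only '0'..'9').
def suma10_alt (num : Int) : Bool :=
  decide ((((PySem.Int.toStr |num|).toList.map (fun c => ((c.toNat : Int) - 48))).sum) ≥ 10)

-- ===== PRECONDITION & SPEC =====
def Spec_suma10 (num : Int) (out : Bool) : Prop := out = suma10_alt num
instance (num : Int) (out : Bool) : Decidable (Spec_suma10 num out) := by unfold Spec_suma10; infer_instance

-- ===== CLAIM (what is proved, stated in full; the proofs are below) =====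
def Claim_equal_suma10 : Prop := ∀ (num : Int), Dom_suma10 num → Spec_suma10 num (suma10 num)

-- ===== LEMMAS AND PROOFS =====

lemma suma10Loop_acc (n : Nat) : ∀ s : Int, suma10Loop n s = s + suma10Loop n 0 := by
  induction n using Nat.strong_induction_on with
  | _ n ih =>
    intro s
    by_cases h : n = 0
    · subst h; simp [suma10Loop]
    · conv_lhs => rw [suma10Loop]
      conv_rhs => rw [suma10Loop]
      simp only [h, if_false]
      rw [ih (n / 10) (Nat.div_lt_self (Nat.pos_of_ne_zero h) (by norm_num)),
          ih (n / 10) (Nat.div_lt_self (Nat.pos_of_ne_zero h) (by norm_num)) ((0 : Int) + (n % 10 : Nat))]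
      ring

lemma digitChar_val (d : Nat) (h : d < 10) : ((Nat.digitChar d).toNat : Int) - 48 = d := by
  interval_cases d <;> rfl

lemma toDigitsCore_sum (fuel : Nat) : ∀ (n : Nat) (acc : List Char), n < 10 ^ fuel →
    ((Nat.toDigitsCore 10 fuel n acc).map (fun c => ((c.toNat : Int) - 48))).sum
      = suma10Loop n 0 + ((acc.map (fun c => ((c.toNat : Int) - 48))).sum) := by
  induction fuel with
  | zero =>
    intro n acc h
    interval_cases n
    rw [Nat.toDigitsCore, suma10Loop]
    simp
  | succ f ih =>
    intro n acc h
    rw [Nat.toDigitsCore]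
    by_cases h0 : n / 10 = 0
    · rw [if_pos h0]
      rw [suma10Loop]
      by_cases hn : n = 0
      · subst hn; simp [digitChar_val]
      · rw [if_neg hn, h0, suma10Loop, if_pos rfl]
        simp [digitChar_val (n % 10) (Nat.mod_lt n (by norm_num))]
    · rw [if_neg h0]
      have hlt : n / 10 < 10 ^ f := by
        apply Nat.div_lt_of_lt_mul
        rw [pow_succ] at h
        omega
      rw [ih (n / 10) (Nat.digitChar (n % 10) :: acc) hlt]
      have hn : n ≠ 0 := fun hh => h0 (by simp [hh])
      conv_rhs => rw [suma10Loop, if_neg hn, suma10Loop_acc (n / 10)]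
      simp only [List.map_cons, List.sum_cons]
      rw [digitChar_val (n % 10) (Nat.mod_lt n (by norm_num))]
      ring

lemma toDigits_sum (n : Nat) :
    ((Nat.toDigits 10 n).map (fun c => ((c.toNat : Int) - 48))).sum = suma10Loop n 0 := by
  have hb : n < 10 ^ (n + 1) := by
    calc n < 2 ^ n := Nat.lt_two_pow_self
    _ ≤ 10 ^ n := Nat.pow_le_pow_left (by norm_num) n
    _ ≤ 10 ^ (n + 1) := Nat.pow_le_pow_right (by norm_num) (Nat.le_succ n)
  have := toDigitsCore_sum (n + 1) n [] hb
  simpa [Nat.toDigits] using this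

-- ===== VERDICT (by name: the statement is the Claim_ definition above) =====
theorem suma10_spec : Claim_equal_suma10 := by
  intro num _
  unfold Spec_suma10 suma10 suma10_alt
  have h1 : (PySem.Int.toStr |num|).toList = Nat.toDigits 10 num.natAbs := by
    rw [PySem.Int.toList_toStr, PySem.Int.toChars]
    rw [if_neg (not_lt.mpr (abs_nonneg num))]
    congr 1
    rw [Int.abs_eq_natAbs]
    omega
  rw [h1, toDigits_sum]
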